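-- pv_equiv track=rewrite | github.com/Mykyta-Chernenko/paradoxbuilders_web_app | scripts/sync_translations.py | get_keys_with_context
-- ===== SOURCE A (Python) =====
-- from typing import Dict, List, Any, Set, Tuple
--
-- def get_keys_with_context(all_keys: List[str], changed_keys: Set[str], context_count: int) -> List[str]:
--     if not changed_keys:
--         return []
--
--     changed_indices = set()
--     for i, key in enumerate(all_keys):
--         if key in changed_keys:
--             changed_indices.add(i)
--
--     indices_with_context = set()
--     for idx in changed_indices:
--         start = max(0, idx - context_count)
--         end = min(len(all_keys), idx + context_count + 1)
--         for i in range(start, end):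
--             indices_with_context.add(i)
--
--     return [all_keys[i] for i in sorted(indices_with_context)]
-- ===== SOURCE B (Python) =====
-- def get_keys_with_context(all_keys, changed_keys, context_count):
--     changed = set(changed_keys)
--     n = len(all_keys)
--     out = []
--     cursor = 0  # first index not yet emitted
--     for i, key in enumerate(all_keys):
--         if key in changed:
--             start = max(cursor, i - context_count)
--             end = min(n, i + context_count + 1)
--             if end > start:
--                 out.extend(all_keys[start:end])
--                 cursor = end
--     return out
-- ===== Notes on version B (the rewrite author's own statement) =====
-- stated objective: faster
-- what changed: B replaces A's per-changed-index window filling into a set plus a final sort by a single left-to-right sweep that merges overlapping context windows with a cursor and emits slices directly, so no index set and no sort are built.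
import Mathlib
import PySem

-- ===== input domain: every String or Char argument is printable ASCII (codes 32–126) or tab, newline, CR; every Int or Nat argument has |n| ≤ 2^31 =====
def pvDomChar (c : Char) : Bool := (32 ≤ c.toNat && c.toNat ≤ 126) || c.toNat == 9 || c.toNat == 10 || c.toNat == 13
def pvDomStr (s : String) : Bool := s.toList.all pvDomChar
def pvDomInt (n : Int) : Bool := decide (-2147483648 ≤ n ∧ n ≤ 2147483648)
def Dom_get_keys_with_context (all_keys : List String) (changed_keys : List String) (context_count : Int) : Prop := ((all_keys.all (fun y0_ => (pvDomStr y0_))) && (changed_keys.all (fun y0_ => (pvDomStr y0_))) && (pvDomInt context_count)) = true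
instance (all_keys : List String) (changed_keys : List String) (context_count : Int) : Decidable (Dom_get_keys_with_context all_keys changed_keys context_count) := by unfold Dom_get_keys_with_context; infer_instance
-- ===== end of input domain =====

-- B replaces A's per-index window filling into a set + final sort by one sweep merging overlapping
-- context windows with a cursor, emitting slices directly (faster).

-- ===== PORT A =====
def get_keys_with_context (all_keys : List String) (changed_keys : List String) (context_count : Int) : List String :=
  if changed_keys = [] then []
  else
    let changed_indices : PySem.Set Int :=
      (PySem.List.enumerate all_keys 0).foldl
        (fun s p => if changed_keys.contains p.2 then PySem.Set.add s p.1 else s) []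
    let indices_with_context : PySem.Set Int :=
      changed_indices.foldl
        (fun s idx =>
          (PySem.List.pyRange (max 0 (idx - context_count))
            (min (all_keys.length : Int) (idx + context_count + 1)) 1).foldl PySem.Set.add s) []
    (PySem.List.sorted indices_with_context (fun x => x) false).map
      (fun i => PySem.List.pyGetD all_keys i "")

-- ===== PORT B =====
def get_keys_with_context_alt (all_keys : List String) (changed_keys : List String) (context_count : Int) : List String :=
  let changed : PySem.Set String := PySem.Set.ofList changed_keys
  let n : Int := (all_keys.length : Int)
  let r :=
    (PySem.List.enumerate all_keys 0).foldl
      (fun (acc : List String × Int) p =>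
        if changed.contains p.2 then
          let start := max acc.2 (p.1 - context_count)
          let e := min n (p.1 + context_count + 1)
          if start < e then
            (acc.1 ++ PySem.List.slice all_keys (some start) (some e), e)
          else acc
        else acc) ([], 0)
  r.1

-- ===== PRECONDITION & SPEC =====
def Spec_get_keys_with_context (all_keys : List String) (changed_keys : List String) (context_count : Int) (out : List String) : Prop := out = get_keys_with_context_alt all_keys changed_keys context_count
instance (all_keys : List String) (changed_keys : List String) (context_count : Int) (out : List String) : Decidable (Spec_get_keys_with_context all_keys changed_keys context_count out) := by unfold Spec_get_keys_with_context; infer_instance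

-- ===== CLAIM (what is proved, stated in full; the proofs are below) =====
def Claim_equal_get_keys_with_context : Prop := ∀ (all_keys : List String) (changed_keys : List String) (context_count : Int), Dom_get_keys_with_context all_keys changed_keys context_count → Spec_get_keys_with_context all_keys changed_keys context_count (get_keys_with_context all_keys changed_keys context_count)

-- ===== LEMMAS AND PROOFS =====

-- merged emission of context windows for an increasing list of changed indices
def mergeOut (n c : Int) : List Int → Int → List Int
  | [], _ => []
  | j :: rest, cur =>
    if max cur (j - c) < min n (j + c + 1) then
      PySem.List.pyRange (max cur (j - c)) (min n (j + c + 1)) 1 ++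
        mergeOut n c rest (min n (j + c + 1))
    else mergeOut n c rest cur

theorem mergeOut_lower (n c : Int) (js : List Int) (cur : Int) :
    ∀ x ∈ mergeOut n c js cur, cur ≤ x := by
  induction js generalizing cur with
  | nil => simp [mergeOut]
  | cons j rest ih =>
    intro x hx
    simp only [mergeOut] at hx
    split at hx
    · rename_i h
      rcases List.mem_append.1 hx with h1 | h1
      · have := (PySem.List.mem_pyRange_one.1 h1).1; omega
      · have := ih _ x h1; omega
    · exact ih _ x hx

theorem mergeOut_pairwise (n c : Int) (js : List Int) (cur : Int) :
    (mergeOut n c js cur).Pairwise (· < ·) := by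
  induction js generalizing cur with
  | nil => simp [mergeOut]
  | cons j rest ih =>
    simp only [mergeOut]
    split
    · rename_i h
      refine List.pairwise_append.2 ⟨PySem.List.pairwise_lt_pyRange_one _ _, ih _, ?_⟩
      intro x hx y hy
      have hx' := (PySem.List.mem_pyRange_one.1 hx).2
      have hy' := mergeOut_lower n c rest _ y hy
      omega
    · exact ih _

theorem mergeOut_mem (n c : Int) (js : List Int) (cur : Int)
    (hcur : 0 ≤ cur) (hjs : js.Pairwise (· ≤ ·)) (x : Int) :
    x ∈ mergeOut n c js cur ↔
      ∃ j ∈ js, (max 0 (j - c) ≤ x ∧ x < min n (j + c + 1)) ∧ cur ≤ x := by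
  induction js generalizing cur with
  | nil => simp [mergeOut]
  | cons j rest ih =>
    have hrest := (List.pairwise_cons.1 hjs).2
    have hhead := (List.pairwise_cons.1 hjs).1
    simp only [mergeOut]
    split
    · rename_i h
      have hcur' : (0:Int) ≤ min n (j + c + 1) := by omega
      rw [List.mem_append, PySem.List.mem_pyRange_one, ih _ hcur' hrest]
      constructor
      · rintro (⟨h1, h2⟩ | ⟨j', hj', ⟨h1, h2⟩, h3⟩)
        · exact ⟨j, by simp, ⟨by omega, h2⟩, by omega⟩
        · exact ⟨j', by simp [hj'], ⟨h1, h2⟩, by omega⟩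
      · rintro ⟨j', hj', ⟨h1, h2⟩, h3⟩
        rcases List.mem_cons.1 hj' with rfl | hj'
        · left; omega
        · by_cases hx : min n (j + c + 1) ≤ x
          · right; exact ⟨j', hj', ⟨h1, h2⟩, hx⟩
          · left
            have := hhead j' hj'
            omega
    · rename_i h
      rw [ih _ hcur hrest]
      constructor
      · rintro ⟨j', hj', hw, h3⟩; exact ⟨j', by simp [hj'], hw, h3⟩
      · rintro ⟨j', hj', ⟨h1, h2⟩, h3⟩
        rcases List.mem_cons.1 hj' with rfl | hj'
        · omega
        · exact ⟨j', hj', ⟨h1, h2⟩, h3⟩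

theorem contains_ofList (l : List String) (x : String) :
    (PySem.Set.ofList l).contains x = l.contains x := by
  by_cases h : x ∈ l <;> simp [h, PySem.Set.mem_ofList]

theorem mem_foldl_add_id (l : List Int) (s : List Int) (x : Int) :
    x ∈ l.foldl PySem.Set.add s ↔ x ∈ s ∨ x ∈ l := by
  induction l generalizing s with
  | nil => simp
  | cons a t ih =>
    simp only [List.foldl_cons, ih, PySem.Set.mem_add, List.mem_cons]
    tauto

theorem nodup_foldl_add (l : List Int) (s : List Int) (h : s.Nodup) :
    (l.foldl PySem.Set.add s).Nodup := by
  induction l generalizing s with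
  | nil => exact h
  | cons a t ih => exact ih _ (PySem.Set.nodup_add _ _ h)

-- membership of A's indices_with_context fold
theorem mem_fold_update (c n : Int) (js : List Int) (s0 : List Int) (x : Int) :
    x ∈ js.foldl
        (fun s idx =>
          (PySem.List.pyRange (max 0 (idx - c)) (min n (idx + c + 1)) 1).foldl PySem.Set.add s) s0
      ↔ x ∈ s0 ∨ ∃ j ∈ js, max 0 (j - c) ≤ x ∧ x < min n (j + c + 1) := by
  induction js generalizing s0 with
  | nil => simp
  | cons j rest ih =>
    simp only [List.foldl_cons, ih, mem_foldl_add_id, PySem.List.mem_pyRange_one, List.mem_cons]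
    constructor
    · rintro ((h | h) | ⟨j', hj', h1, h2⟩)
      · exact Or.inl h
      · exact Or.inr ⟨j, Or.inl rfl, h.1, h.2⟩
      · exact Or.inr ⟨j', Or.inr hj', h1, h2⟩
    · rintro (h | ⟨j', (rfl | hj'), h1, h2⟩)
      · exact Or.inl (Or.inl h)
      · exact Or.inl (Or.inr ⟨h1, h2⟩)
      · exact Or.inr ⟨j', hj', h1, h2⟩

theorem nodup_fold_update (c n : Int) (js : List Int) (s0 : List Int) (h : s0.Nodup) :
    (js.foldl
        (fun s idx =>
          (PySem.List.pyRange (max 0 (idx - c)) (min n (idx + c + 1)) 1).foldl PySem.Set.add s) s0).Nodup := by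
  induction js generalizing s0 with
  | nil => exact h
  | cons j rest ih => exact ih _ (nodup_foldl_add _ _ h)

theorem slice_eq_map (all_keys : List String) (s e : Int)
    (hs : 0 ≤ s) (hse : s ≤ e) (hen : e ≤ (all_keys.length : Int)) :
    PySem.List.slice all_keys (some s) (some e)
      = (PySem.List.pyRange s e 1).map (fun i => PySem.List.pyGetD all_keys i "") := by
  rw [PySem.List.slice_toNat _ hs (by omega), PySem.List.pyRange_one, List.map_map]
  apply List.ext_getElem
  · simp
    omega
  · intro k h1 h2
    simp only [List.getElem_take, List.getElem_drop, List.getElem_map, List.getElem_range,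
      Function.comp_apply]
    rw [PySem.List.pyGetD_of_nonneg all_keys "" (by omega)]
    have hk : (s + (k : Int)).toNat = s.toNat + k := by omega
    rw [hk, List.getD_eq_getElem _ _ (by simp at h1; omega)]

-- the changed indices, in increasing order
def Cidx (all_keys changed_keys : List String) : List Int :=
  (PySem.List.pyRange 0 (all_keys.length : Int) 1).filter
    (fun j => changed_keys.contains (PySem.List.pyGetD all_keys j ""))

theorem Cidx_pairwise_lt (a ck : List String) : (Cidx a ck).Pairwise (· < ·) :=
  List.Pairwise.filter _ (PySem.List.pairwise_lt_pyRange_one _ _)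

theorem Cidx_pairwise_le (a ck : List String) : (Cidx a ck).Pairwise (· ≤ ·) :=
  (Cidx_pairwise_lt a ck).imp le_of_lt

theorem Cidx_nodup (a ck : List String) : (Cidx a ck).Nodup :=
  (Cidx_pairwise_lt a ck).imp ne_of_lt

theorem A_eq (a ck : List String) (c : Int) :
    get_keys_with_context a ck c
      = (mergeOut (a.length : Int) c (Cidx a ck) 0).map (fun i => PySem.List.pyGetD a i "") := by
  by_cases hck : ck = []
  · subst hck
    simp [get_keys_with_context, Cidx, mergeOut]
  · simp only [get_keys_with_context, if_neg hck]
    rw [PySem.List.enumerate_eq_map_pyRange a "", List.foldl_map]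
    simp only [PySem.List.len]
    rw [← List.foldl_filter, ← PySem.Set.ofList_eq_foldl]
    rw [show (List.filter (fun y => ck.contains (PySem.List.pyGetD a y ""))
        (PySem.List.pyRange 0 (a.length : Int))) = Cidx a ck from rfl]
    rw [PySem.Set.ofList_eq_self_of_nodup _ (Cidx_nodup a ck)]
    congr 1
    apply PySem.List.sorted_eq_of_perm_of_pairwise_lt
    · refine (List.perm_ext_iff_of_nodup (mergeOut_pairwise _ _ _ _).nodup
        (nodup_fold_update _ _ _ _ List.nodup_nil)).2 ?_
      intro x
      rw [mergeOut_mem _ _ _ _ le_rfl (Cidx_pairwise_le a ck), mem_fold_update]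
      simp only [List.not_mem_nil, false_or]
      constructor
      · rintro ⟨j, hj, ⟨h1, h2⟩, _⟩; exact ⟨j, hj, h1, h2⟩
      · rintro ⟨j, hj, h1, h2⟩; exact ⟨j, hj, ⟨h1, h2⟩, by omega⟩
    · exact mergeOut_pairwise _ _ _ _

theorem B_fold (a : List String) (c : Int) (js : List Int) (out : List String) (cur : Int)
    (hcur : 0 ≤ cur) :
    (js.foldl (fun (acc : List String × Int) j =>
        if max acc.2 (j - c) < min ((a.length : Int)) (j + c + 1) then
          (acc.1 ++ PySem.List.slice a (some (max acc.2 (j - c)))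
              (some (min ((a.length : Int)) (j + c + 1))),
            min ((a.length : Int)) (j + c + 1))
        else acc) (out, cur)).1
      = out ++ (mergeOut (a.length : Int) c js cur).map (fun i => PySem.List.pyGetD a i "") := by
  induction js generalizing out cur with
  | nil => simp [mergeOut]
  | cons j rest ih =>
    simp only [List.foldl_cons, mergeOut]
    split
    · rename_i h
      rw [ih _ _ (by omega), slice_eq_map a _ _ (by omega) (by omega) (by omega)]
      simp [List.append_assoc]
    · rename_i h
      exact ih _ _ hcur

theorem B_eq (a ck : List String) (c : Int) :
    get_keys_with_context_alt a ck c
      = (mergeOut (a.length : Int) c (Cidx a ck) 0).map (fun i => PySem.List.pyGetD a i "") := by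
  simp only [get_keys_with_context_alt]
  rw [PySem.List.enumerate_eq_map_pyRange a "", List.foldl_map]
  simp only [PySem.List.len, contains_ofList]
  rw [← List.foldl_filter]
  rw [show (List.filter (fun y => ck.contains (PySem.List.pyGetD a y ""))
      (PySem.List.pyRange 0 (a.length : Int))) = Cidx a ck from rfl]
  rw [B_fold a c (Cidx a ck) [] 0 le_rfl]
  simp

-- ===== VERDICT (by name: the statement is the Claim_ definition above) =====
theorem get_keys_with_context_spec : Claim_equal_get_keys_with_context := by
  intro a ck c _
  unfold Spec_get_keys_with_context
  rw [A_eq, B_eq]
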